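-- pv_equiv track=rewrite | github.com/kh277/BOJ | 백준/Gold/27188. The Length of the Sequence/The Length of the Sequence.py | digitLength
-- ===== SOURCE A (Python) =====
-- def digitLength(start, end):
--     result = 0
--
--     if start == 0:
--         result += 1
--         start = 1
--
--     for i in range(1, 20):
--         left = max(start, 10**(i - 1))
--         right = min(end, 10**i - 1)
--         if left > right:
--             continue
--         result += (right - left + 1) * i
--         if right == end:
--             break
--
--     return result
-- ===== SOURCE B (Python) =====
-- def _g(n):
--     # total number of digits of the integers 1..n (0 for n < 1)
--     if n < 1:
--         return 0
--     k = 1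
--     while 10 ** k <= n:
--         k += 1
--     return (n + 1) * k - (10 ** k - 1) // 9
--
--
-- def digitLength(start, end):
--     if start == 0:
--         return 1 + _g(end)
--     return max(_g(end) - _g(max(start, 1) - 1), 0)
-- ===== Notes on version B (the rewrite author's own statement) =====
-- stated objective: alternative
-- what changed: Replaces A's 19-iteration bucket scan (with continue/break) by a closed-form helper g(n) = (n+1)*k - (10^k-1)//9 for the total digit count of 1..n (k = number of digits of n), returning max(g(end) - g(max(start,1)-1), 0), and 1 + g(end) for start == 0.
import Mathlib
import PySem

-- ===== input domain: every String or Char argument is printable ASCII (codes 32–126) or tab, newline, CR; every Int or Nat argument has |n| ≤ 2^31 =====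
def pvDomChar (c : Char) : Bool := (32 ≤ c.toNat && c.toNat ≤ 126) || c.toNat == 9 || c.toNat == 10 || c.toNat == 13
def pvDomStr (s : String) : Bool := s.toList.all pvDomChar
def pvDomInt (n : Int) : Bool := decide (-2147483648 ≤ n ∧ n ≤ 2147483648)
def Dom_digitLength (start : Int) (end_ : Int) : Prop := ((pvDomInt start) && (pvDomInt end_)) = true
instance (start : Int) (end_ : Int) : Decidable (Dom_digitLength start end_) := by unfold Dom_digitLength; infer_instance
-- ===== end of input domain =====

-- ===== PORT A =====
-- B replaces A's 19-bucket scan by a closed-form digit-sum helper; return-value equivalence on Dom.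

-- the for-loop of A over range(1, 20), with `continue` and `break`;
-- 10**(i-1) / 10**i ported as 10 ^ (i-1).toNat / 10 ^ i.toNat, exact for the loop's i ∈ 1..19
def digitLengthLoop (start : Int) (end_ : Int) : List Int → Int → Int
  | [], result => result
  | i :: rest, result =>
    let left := max start (10 ^ (i - 1).toNat)
    let right := min end_ (10 ^ i.toNat - 1)
    if left > right then
      digitLengthLoop start end_ rest result
    else
      let result := result + (right - left + 1) * i
      if right == end_ then result
      else digitLengthLoop start end_ rest result

def digitLength (start : Int) (end_ : Int) : Int :=
  let result : Int := 0
  if start == 0 then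
    digitLengthLoop 1 end_ (PySem.List.pyRange 1 20 1) (result + 1)
  else
    digitLengthLoop start end_ (PySem.List.pyRange 1 20 1) result

-- ===== PORT B =====
-- Source B's `while 10 ** k <= n: k += 1` (k counts the digits of n; k : Nat, exact since k starts at 1 ≥ 0)
def gLoop (n : Int) (k : Nat) : Nat :=
  if 10 ^ k ≤ n then gLoop n (k + 1) else k
termination_by (n + 1 - 10 ^ k).toNat
decreasing_by
  have h1 : (10:Int) ^ k < 10 ^ (k + 1) := by
    have := pow_lt_pow_right₀ (a := (10:Int)) (by norm_num) (Nat.lt_succ_self k)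
    simpa using this
  omega

-- Source B's _g: total number of digits of the integers 1..n (0 for n < 1)
def gAlt (n : Int) : Int :=
  if n < 1 then 0
  else
    let k := gLoop n 1
    (n + 1) * (k : Int) - PySem.Int.floordiv (10 ^ k - 1) 9

def digitLength_alt (start : Int) (end_ : Int) : Int :=
  if start == 0 then 1 + gAlt end_
  else max (gAlt end_ - gAlt (max start 1 - 1)) 0

-- ===== PRECONDITION & SPEC =====
def Spec_digitLength (start : Int) (end_ : Int) (out : Int) : Prop := out = digitLength_alt start end_
instance (start : Int) (end_ : Int) (out : Int) : Decidable (Spec_digitLength start end_ out) := by unfold Spec_digitLength; infer_instance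

-- ===== CLAIM (what is proved, stated in full; the proofs are below) =====
def Claim_equal_digitLength : Prop := ∀ (start : Int) (end_ : Int), Dom_digitLength start end_ → Spec_digitLength start end_ (digitLength start end_)

-- ===== LEMMAS AND PROOFS =====

-- proof-side model of A's loop without the break: the plain sum of the bucket terms
def term (s : Int) (e : Int) (i : Int) : Int :=
  max 0 (min e (10 ^ i.toNat - 1) - max s (10 ^ (i - 1).toNat) + 1) * i

def sumTerms (s : Int) (e : Int) (is : List Int) : Int := (is.map (term s e)).sum

theorem sumTerms_nil (s e : Int) : sumTerms s e [] = 0 := rfl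

theorem sumTerms_cons (s e i : Int) (is : List Int) :
    sumTerms s e (i :: is) = term s e i + sumTerms s e is := by
  simp [sumTerms]

-- once the break fires at bucket i (end_ ≤ 10^i - 1), every later bucket is empty
theorem sumTerms_zero_of_lt (s e : Int) (i : Int) (is : List Int)
    (h1 : ∀ j ∈ is, i < j ∧ 1 ≤ j) (h2 : e < 10 ^ i.toNat) (hi : 1 ≤ i) :
    sumTerms s e is = 0 := by
  induction is with
  | nil => rfl
  | cons j js ih =>
    obtain ⟨hij, hj1⟩ := h1 j (by simp)
    have hpow : (10:Int) ^ i.toNat ≤ 10 ^ (j - 1).toNat :=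
      pow_le_pow_right₀ (by norm_num) (by omega)
    have hterm : term s e j = 0 := by
      unfold term
      have : min e (10 ^ j.toNat - 1) - max s (10 ^ (j - 1).toNat) + 1 ≤ 0 := by omega
      have hmax : max 0 (min e (10 ^ j.toNat - 1) - max s (10 ^ (j - 1).toNat) + 1) = 0 := by omega
      rw [hmax]; ring
    rw [sumTerms_cons, hterm, ih (fun x hx => h1 x (by simp [hx]))]
    ring

theorem digitLengthLoop_cons (s e i acc : Int) (rest : List Int) :
    digitLengthLoop s e (i :: rest) acc =
      if max s (10 ^ (i - 1).toNat) > min e (10 ^ i.toNat - 1) then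
        digitLengthLoop s e rest acc
      else
        if min e (10 ^ i.toNat - 1) == e then
          acc + (min e (10 ^ i.toNat - 1) - max s (10 ^ (i - 1).toNat) + 1) * i
        else
          digitLengthLoop s e rest
            (acc + (min e (10 ^ i.toNat - 1) - max s (10 ^ (i - 1).toNat) + 1) * i) := rfl

-- A's loop (with continue/break) computes acc + the plain sum, on any strictly increasing list of i ≥ 1
theorem digitLengthLoop_eq (s e : Int) (is : List Int) (acc : Int)
    (hmono : is.Pairwise (· < ·)) (hone : ∀ j ∈ is, 1 ≤ j) :
    digitLengthLoop s e is acc = acc + sumTerms s e is := by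
  induction is generalizing acc with
  | nil => simp [digitLengthLoop, sumTerms_nil]
  | cons i js ih =>
    rw [List.pairwise_cons] at hmono
    obtain ⟨hlt, hmono'⟩ := hmono
    have hi1 : 1 ≤ i := hone i (by simp)
    have hone' : ∀ j ∈ js, 1 ≤ j := fun j hj => hone j (by simp [hj])
    rw [sumTerms_cons, digitLengthLoop_cons]
    by_cases hc : max s (10 ^ (i - 1).toNat) > min e (10 ^ i.toNat - 1)
    · have hterm : term s e i = 0 := by
        unfold term
        have hmax : max 0 (min e (10 ^ i.toNat - 1) - max s (10 ^ (i - 1).toNat) + 1) = 0 := by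
          omega
        rw [hmax]; ring
      simp only [if_pos hc, ih acc hmono' hone', hterm]
      ring
    · have hterm : term s e i =
          (min e (10 ^ i.toNat - 1) - max s (10 ^ (i - 1).toNat) + 1) * i := by
        unfold term
        have hmax : max 0 (min e (10 ^ i.toNat - 1) - max s (10 ^ (i - 1).toNat) + 1) =
            min e (10 ^ i.toNat - 1) - max s (10 ^ (i - 1).toNat) + 1 := by omega
        rw [hmax]
      by_cases hb : min e (10 ^ i.toNat - 1) = e
      · have hz : sumTerms s e js = 0 := by
          refine sumTerms_zero_of_lt s e i js
            (fun j hj => ⟨List.rel_of_pairwise_cons (List.pairwise_cons.mpr ⟨hlt, hmono'⟩) hj,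
              hone' j hj⟩) (by omega) hi1
        rw [if_neg hc, hterm, hz]
        simp only [hb, beq_self_eq_true, if_true]
        ring
      · have hb' : (min e (10 ^ i.toNat - 1) == e) = false := by
          simp [hb]
        rw [if_neg hc, hb']
        simp only [Bool.false_eq_true, if_false]
        rw [ih _ hmono' hone', hterm]
        ring

def R19 : List Int := [1,2,3,4,5,6,7,8,9,10,11,12,13,14,15,16,17,18,19]

theorem pyRange_eq_R19 : PySem.List.pyRange 1 20 1 = R19 := by decide

-- terms only see start through max start lo with lo ≥ 1, so any start ≤ 1 acts like 1
theorem sumTerms_of_le_one (s e : Int) (is : List Int) (hs : s ≤ 1) :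
    sumTerms s e is = sumTerms 1 e is := by
  induction is with
  | nil => rfl
  | cons i js ih =>
    rw [sumTerms_cons, sumTerms_cons, ih]
    have h1 : (1:Int) ≤ 10 ^ (i - 1).toNat := one_le_pow₀ (by norm_num)
    have : max s (10 ^ (i - 1).toNat) = max 1 (10 ^ (i - 1).toNat) := by omega
    unfold term
    rw [this]

-- splitting [s, e] against [1, e] and [1, s-1], bucket by bucket
theorem term_split (s e i : Int) (_hs : 1 ≤ s) (hi : 1 ≤ i) (hse : s - 1 ≤ e) :
    term s e i = term 1 e i - term 1 (s - 1) i := by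
  unfold term
  have h1 : (1:Int) ≤ 10 ^ (i - 1).toNat := one_le_pow₀ (by norm_num)
  have h2 : (10:Int) ^ (i - 1).toNat ≤ 10 ^ i.toNat := pow_le_pow_right₀ (by norm_num) (by omega)
  rw [← sub_mul]
  congr 1
  omega

theorem sumTerms_split (s e : Int) (is : List Int) (hs : 1 ≤ s) (hse : s - 1 ≤ e)
    (hone : ∀ j ∈ is, 1 ≤ j) :
    sumTerms s e is = sumTerms 1 e is - sumTerms 1 (s - 1) is := by
  induction is with
  | nil => simp [sumTerms_nil]
  | cons i js ih =>
    rw [sumTerms_cons, sumTerms_cons, sumTerms_cons,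
      term_split s e i hs (hone i (by simp)) hse, ih (fun j hj => hone j (by simp [hj]))]
    ring

theorem term_nonneg (s e i : Int) (hi : 0 ≤ i) : 0 ≤ term s e i := by
  unfold term
  have : (0:Int) ≤ max 0 (min e (10 ^ i.toNat - 1) - max s (10 ^ (i - 1).toNat) + 1) :=
    le_max_left _ _
  exact mul_nonneg this hi

theorem sumTerms_nonneg (s e : Int) (is : List Int) (hone : ∀ j ∈ is, 1 ≤ j) :
    0 ≤ sumTerms s e is := by
  induction is with
  | nil => simp [sumTerms_nil]
  | cons i js ih =>
    rw [sumTerms_cons]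
    have := term_nonneg s e i (by have := hone i (by simp); omega)
    have := ih (fun j hj => hone j (by simp [hj]))
    omega

theorem term_mono (s e e' i : Int) (h : e ≤ e') (hi : 1 ≤ i) : term s e i ≤ term s e' i := by
  unfold term
  have hmax : max 0 (min e (10 ^ i.toNat - 1) - max s (10 ^ (i - 1).toNat) + 1) ≤
      max 0 (min e' (10 ^ i.toNat - 1) - max s (10 ^ (i - 1).toNat) + 1) := by omega
  exact mul_le_mul_of_nonneg_right hmax (by omega)

theorem sumTerms_mono (s e e' : Int) (is : List Int) (h : e ≤ e') (hone : ∀ j ∈ is, 1 ≤ j) :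
    sumTerms s e is ≤ sumTerms s e' is := by
  induction is with
  | nil => simp [sumTerms_nil]
  | cons i js ih =>
    rw [sumTerms_cons, sumTerms_cons]
    have := term_mono s e e' i h (hone i (by simp))
    have := ih (fun j hj => hone j (by simp [hj]))
    omega

theorem sumTerms_empty (s e : Int) (is : List Int) (h : e < s)
    (hone : ∀ j ∈ is, 1 ≤ j) : sumTerms s e is = 0 := by
  induction is with
  | nil => rfl
  | cons i js ih =>
    have hterm : term s e i = 0 := by
      unfold term
      have hmax : max 0 (min e (10 ^ i.toNat - 1) - max s (10 ^ (i - 1).toNat) + 1) = 0 := by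
        omega
      rw [hmax]; ring
    rw [sumTerms_cons, hterm, ih (fun j hj => hone j (by simp [hj]))]
    ring

theorem R19_one : ∀ j ∈ R19, 1 ≤ j := by decide

-- the while loop of _g finds the digit count: specification by fun_induction
theorem gLoop_spec (n : Int) (k : Nat) (hk : 1 ≤ k) (h : 10 ^ (k - 1) ≤ n) :
    10 ^ (gLoop n k - 1) ≤ n ∧ n < 10 ^ (gLoop n k) ∧ 1 ≤ gLoop n k := by
  fun_induction gLoop n k with
  | case1 k hc ih => exact ih (by omega) (by simpa using hc)
  | case2 k hc => exact ⟨h, by omega, hk⟩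

-- the plain 19-bucket sum from 1 agrees with the closed form, for |n| within the domain bound
theorem term_full (n i : Int) (hi : 1 ≤ i) (h : 10 ^ i.toNat - 1 ≤ n) :
    term 1 n i = (10 ^ i.toNat - 10 ^ (i - 1).toNat) * i := by
  unfold term
  have h1 : (1:Int) ≤ 10 ^ (i - 1).toNat := one_le_pow₀ (by norm_num)
  have h2 : (10:Int) ^ (i - 1).toNat ≤ 10 ^ i.toNat := pow_le_pow_right₀ (by norm_num) (by omega)
  congr 1
  omega

theorem term_at (n i : Int) (_hi : 1 ≤ i) (hlo' : 10 ^ (i - 1).toNat ≤ n)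
    (hhi' : n < 10 ^ i.toNat) : term 1 n i = (n - 10 ^ (i - 1).toNat + 1) * i := by
  unfold term
  have h1 : (1:Int) ≤ 10 ^ (i - 1).toNat := one_le_pow₀ (by norm_num)
  congr 1
  omega

theorem term_high (n i : Int) (h : n < 10 ^ (i - 1).toNat) : term 1 n i = 0 := by
  unfold term
  have h1 : (1:Int) ≤ 10 ^ (i - 1).toNat := one_le_pow₀ (by norm_num)
  have hm : min n (10 ^ i.toNat - 1) ≤ n := min_le_left _ _
  rw [show max 0 (min n (10 ^ i.toNat - 1) - max 1 (10 ^ (i - 1).toNat) + 1) = 0 from by omega,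
    zero_mul]

set_option maxHeartbeats 1000000 in
theorem sumTerms_eq_gAlt (n : Int) (hn : n ≤ 2147483648) :
    sumTerms 1 n R19 = gAlt n := by
  by_cases h1 : n < 1
  · rw [sumTerms_empty 1 n R19 h1 R19_one, gAlt, if_pos h1]
  · obtain ⟨hlo, hhi, hk1⟩ := gLoop_spec n 1 le_rfl (by norm_num <;> omega)
    set k := gLoop n 1 with hkdef
    have hk10 : k ≤ 10 := by
      by_contra hgt
      have : (10:Int) ^ (10:Nat) ≤ 10 ^ (k - 1) :=
        pow_le_pow_right₀ (by norm_num) (by omega)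
      norm_num at this
      omega
    have hgalt : gAlt n = (n + 1) * (k : Int) - PySem.Int.floordiv (10 ^ k - 1) 9 := by
      rw [gAlt, if_neg (by omega : ¬ n < 1)]
    rw [hgalt]
    clear hkdef
    clear_value k
    interval_cases k
    · norm_num [Int.toNat] at hlo hhi
      simp only [sumTerms, R19, List.map_cons, List.map_nil, List.sum_cons, List.sum_nil]
      rw [show PySem.Int.floordiv (10 ^ (1:Nat) - 1) 9 = 1 from by decide,
        term_at n 1 (by norm_num) (by norm_num [Int.toNat] <;> omega) (by norm_num [Int.toNat] <;> omega),
        term_high n 2 (by norm_num [Int.toNat] <;> omega),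
        term_high n 3 (by norm_num [Int.toNat] <;> omega),
        term_high n 4 (by norm_num [Int.toNat] <;> omega),
        term_high n 5 (by norm_num [Int.toNat] <;> omega),
        term_high n 6 (by norm_num [Int.toNat] <;> omega),
        term_high n 7 (by norm_num [Int.toNat] <;> omega),
        term_high n 8 (by norm_num [Int.toNat] <;> omega),
        term_high n 9 (by norm_num [Int.toNat] <;> omega),
        term_high n 10 (by norm_num [Int.toNat] <;> omega),
        term_high n 11 (by norm_num [Int.toNat] <;> omega),
        term_high n 12 (by norm_num [Int.toNat] <;> omega),
        term_high n 13 (by norm_num [Int.toNat] <;> omega),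
        term_high n 14 (by norm_num [Int.toNat] <;> omega),
        term_high n 15 (by norm_num [Int.toNat] <;> omega),
        term_high n 16 (by norm_num [Int.toNat] <;> omega),
        term_high n 17 (by norm_num [Int.toNat] <;> omega),
        term_high n 18 (by norm_num [Int.toNat] <;> omega),
        term_high n 19 (by norm_num [Int.toNat] <;> omega)]
      norm_num [Int.toNat]
    · norm_num [Int.toNat] at hlo hhi
      simp only [sumTerms, R19, List.map_cons, List.map_nil, List.sum_cons, List.sum_nil]
      rw [show PySem.Int.floordiv (10 ^ (2:Nat) - 1) 9 = 11 from by decide,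
        term_full n 1 (by norm_num) (by norm_num [Int.toNat] <;> omega),
        term_at n 2 (by norm_num) (by norm_num [Int.toNat] <;> omega) (by norm_num [Int.toNat] <;> omega),
        term_high n 3 (by norm_num [Int.toNat] <;> omega),
        term_high n 4 (by norm_num [Int.toNat] <;> omega),
        term_high n 5 (by norm_num [Int.toNat] <;> omega),
        term_high n 6 (by norm_num [Int.toNat] <;> omega),
        term_high n 7 (by norm_num [Int.toNat] <;> omega),
        term_high n 8 (by norm_num [Int.toNat] <;> omega),
        term_high n 9 (by norm_num [Int.toNat] <;> omega),
        term_high n 10 (by norm_num [Int.toNat] <;> omega),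
        term_high n 11 (by norm_num [Int.toNat] <;> omega),
        term_high n 12 (by norm_num [Int.toNat] <;> omega),
        term_high n 13 (by norm_num [Int.toNat] <;> omega),
        term_high n 14 (by norm_num [Int.toNat] <;> omega),
        term_high n 15 (by norm_num [Int.toNat] <;> omega),
        term_high n 16 (by norm_num [Int.toNat] <;> omega),
        term_high n 17 (by norm_num [Int.toNat] <;> omega),
        term_high n 18 (by norm_num [Int.toNat] <;> omega),
        term_high n 19 (by norm_num [Int.toNat] <;> omega)]
      norm_num [Int.toNat]
      all_goals omega
    · norm_num [Int.toNat] at hlo hhi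
      simp only [sumTerms, R19, List.map_cons, List.map_nil, List.sum_cons, List.sum_nil]
      rw [show PySem.Int.floordiv (10 ^ (3:Nat) - 1) 9 = 111 from by decide,
        term_full n 1 (by norm_num) (by norm_num [Int.toNat] <;> omega),
        term_full n 2 (by norm_num) (by norm_num [Int.toNat] <;> omega),
        term_at n 3 (by norm_num) (by norm_num [Int.toNat] <;> omega) (by norm_num [Int.toNat] <;> omega),
        term_high n 4 (by norm_num [Int.toNat] <;> omega),
        term_high n 5 (by norm_num [Int.toNat] <;> omega),
        term_high n 6 (by norm_num [Int.toNat] <;> omega),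
        term_high n 7 (by norm_num [Int.toNat] <;> omega),
        term_high n 8 (by norm_num [Int.toNat] <;> omega),
        term_high n 9 (by norm_num [Int.toNat] <;> omega),
        term_high n 10 (by norm_num [Int.toNat] <;> omega),
        term_high n 11 (by norm_num [Int.toNat] <;> omega),
        term_high n 12 (by norm_num [Int.toNat] <;> omega),
        term_high n 13 (by norm_num [Int.toNat] <;> omega),
        term_high n 14 (by norm_num [Int.toNat] <;> omega),
        term_high n 15 (by norm_num [Int.toNat] <;> omega),
        term_high n 16 (by norm_num [Int.toNat] <;> omega),
        term_high n 17 (by norm_num [Int.toNat] <;> omega),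
        term_high n 18 (by norm_num [Int.toNat] <;> omega),
        term_high n 19 (by norm_num [Int.toNat] <;> omega)]
      norm_num [Int.toNat]
      all_goals omega
    · norm_num [Int.toNat] at hlo hhi
      simp only [sumTerms, R19, List.map_cons, List.map_nil, List.sum_cons, List.sum_nil]
      rw [show PySem.Int.floordiv (10 ^ (4:Nat) - 1) 9 = 1111 from by decide,
        term_full n 1 (by norm_num) (by norm_num [Int.toNat] <;> omega),
        term_full n 2 (by norm_num) (by norm_num [Int.toNat] <;> omega),
        term_full n 3 (by norm_num) (by norm_num [Int.toNat] <;> omega),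
        term_at n 4 (by norm_num) (by norm_num [Int.toNat] <;> omega) (by norm_num [Int.toNat] <;> omega),
        term_high n 5 (by norm_num [Int.toNat] <;> omega),
        term_high n 6 (by norm_num [Int.toNat] <;> omega),
        term_high n 7 (by norm_num [Int.toNat] <;> omega),
        term_high n 8 (by norm_num [Int.toNat] <;> omega),
        term_high n 9 (by norm_num [Int.toNat] <;> omega),
        term_high n 10 (by norm_num [Int.toNat] <;> omega),
        term_high n 11 (by norm_num [Int.toNat] <;> omega),
        term_high n 12 (by norm_num [Int.toNat] <;> omega),
        term_high n 13 (by norm_num [Int.toNat] <;> omega),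
        term_high n 14 (by norm_num [Int.toNat] <;> omega),
        term_high n 15 (by norm_num [Int.toNat] <;> omega),
        term_high n 16 (by norm_num [Int.toNat] <;> omega),
        term_high n 17 (by norm_num [Int.toNat] <;> omega),
        term_high n 18 (by norm_num [Int.toNat] <;> omega),
        term_high n 19 (by norm_num [Int.toNat] <;> omega)]
      norm_num [Int.toNat]
      all_goals omega
    · norm_num [Int.toNat] at hlo hhi
      simp only [sumTerms, R19, List.map_cons, List.map_nil, List.sum_cons, List.sum_nil]
      rw [show PySem.Int.floordiv (10 ^ (5:Nat) - 1) 9 = 11111 from by decide,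
        term_full n 1 (by norm_num) (by norm_num [Int.toNat] <;> omega),
        term_full n 2 (by norm_num) (by norm_num [Int.toNat] <;> omega),
        term_full n 3 (by norm_num) (by norm_num [Int.toNat] <;> omega),
        term_full n 4 (by norm_num) (by norm_num [Int.toNat] <;> omega),
        term_at n 5 (by norm_num) (by norm_num [Int.toNat] <;> omega) (by norm_num [Int.toNat] <;> omega),
        term_high n 6 (by norm_num [Int.toNat] <;> omega),
        term_high n 7 (by norm_num [Int.toNat] <;> omega),
        term_high n 8 (by norm_num [Int.toNat] <;> omega),
        term_high n 9 (by norm_num [Int.toNat] <;> omega),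
        term_high n 10 (by norm_num [Int.toNat] <;> omega),
        term_high n 11 (by norm_num [Int.toNat] <;> omega),
        term_high n 12 (by norm_num [Int.toNat] <;> omega),
        term_high n 13 (by norm_num [Int.toNat] <;> omega),
        term_high n 14 (by norm_num [Int.toNat] <;> omega),
        term_high n 15 (by norm_num [Int.toNat] <;> omega),
        term_high n 16 (by norm_num [Int.toNat] <;> omega),
        term_high n 17 (by norm_num [Int.toNat] <;> omega),
        term_high n 18 (by norm_num [Int.toNat] <;> omega),
        term_high n 19 (by norm_num [Int.toNat] <;> omega)]
      norm_num [Int.toNat]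
      all_goals omega
    · norm_num [Int.toNat] at hlo hhi
      simp only [sumTerms, R19, List.map_cons, List.map_nil, List.sum_cons, List.sum_nil]
      rw [show PySem.Int.floordiv (10 ^ (6:Nat) - 1) 9 = 111111 from by decide,
        term_full n 1 (by norm_num) (by norm_num [Int.toNat] <;> omega),
        term_full n 2 (by norm_num) (by norm_num [Int.toNat] <;> omega),
        term_full n 3 (by norm_num) (by norm_num [Int.toNat] <;> omega),
        term_full n 4 (by norm_num) (by norm_num [Int.toNat] <;> omega),
        term_full n 5 (by norm_num) (by norm_num [Int.toNat] <;> omega),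
        term_at n 6 (by norm_num) (by norm_num [Int.toNat] <;> omega) (by norm_num [Int.toNat] <;> omega),
        term_high n 7 (by norm_num [Int.toNat] <;> omega),
        term_high n 8 (by norm_num [Int.toNat] <;> omega),
        term_high n 9 (by norm_num [Int.toNat] <;> omega),
        term_high n 10 (by norm_num [Int.toNat] <;> omega),
        term_high n 11 (by norm_num [Int.toNat] <;> omega),
        term_high n 12 (by norm_num [Int.toNat] <;> omega),
        term_high n 13 (by norm_num [Int.toNat] <;> omega),
        term_high n 14 (by norm_num [Int.toNat] <;> omega),
        term_high n 15 (by norm_num [Int.toNat] <;> omega),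
        term_high n 16 (by norm_num [Int.toNat] <;> omega),
        term_high n 17 (by norm_num [Int.toNat] <;> omega),
        term_high n 18 (by norm_num [Int.toNat] <;> omega),
        term_high n 19 (by norm_num [Int.toNat] <;> omega)]
      norm_num [Int.toNat]
      all_goals omega
    · norm_num [Int.toNat] at hlo hhi
      simp only [sumTerms, R19, List.map_cons, List.map_nil, List.sum_cons, List.sum_nil]
      rw [show PySem.Int.floordiv (10 ^ (7:Nat) - 1) 9 = 1111111 from by decide,
        term_full n 1 (by norm_num) (by norm_num [Int.toNat] <;> omega),
        term_full n 2 (by norm_num) (by norm_num [Int.toNat] <;> omega),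
        term_full n 3 (by norm_num) (by norm_num [Int.toNat] <;> omega),
        term_full n 4 (by norm_num) (by norm_num [Int.toNat] <;> omega),
        term_full n 5 (by norm_num) (by norm_num [Int.toNat] <;> omega),
        term_full n 6 (by norm_num) (by norm_num [Int.toNat] <;> omega),
        term_at n 7 (by norm_num) (by norm_num [Int.toNat] <;> omega) (by norm_num [Int.toNat] <;> omega),
        term_high n 8 (by norm_num [Int.toNat] <;> omega),
        term_high n 9 (by norm_num [Int.toNat] <;> omega),
        term_high n 10 (by norm_num [Int.toNat] <;> omega),
        term_high n 11 (by norm_num [Int.toNat] <;> omega),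
        term_high n 12 (by norm_num [Int.toNat] <;> omega),
        term_high n 13 (by norm_num [Int.toNat] <;> omega),
        term_high n 14 (by norm_num [Int.toNat] <;> omega),
        term_high n 15 (by norm_num [Int.toNat] <;> omega),
        term_high n 16 (by norm_num [Int.toNat] <;> omega),
        term_high n 17 (by norm_num [Int.toNat] <;> omega),
        term_high n 18 (by norm_num [Int.toNat] <;> omega),
        term_high n 19 (by norm_num [Int.toNat] <;> omega)]
      norm_num [Int.toNat]
      all_goals omega
    · norm_num [Int.toNat] at hlo hhi
      simp only [sumTerms, R19, List.map_cons, List.map_nil, List.sum_cons, List.sum_nil]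
      rw [show PySem.Int.floordiv (10 ^ (8:Nat) - 1) 9 = 11111111 from by decide,
        term_full n 1 (by norm_num) (by norm_num [Int.toNat] <;> omega),
        term_full n 2 (by norm_num) (by norm_num [Int.toNat] <;> omega),
        term_full n 3 (by norm_num) (by norm_num [Int.toNat] <;> omega),
        term_full n 4 (by norm_num) (by norm_num [Int.toNat] <;> omega),
        term_full n 5 (by norm_num) (by norm_num [Int.toNat] <;> omega),
        term_full n 6 (by norm_num) (by norm_num [Int.toNat] <;> omega),
        term_full n 7 (by norm_num) (by norm_num [Int.toNat] <;> omega),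
        term_at n 8 (by norm_num) (by norm_num [Int.toNat] <;> omega) (by norm_num [Int.toNat] <;> omega),
        term_high n 9 (by norm_num [Int.toNat] <;> omega),
        term_high n 10 (by norm_num [Int.toNat] <;> omega),
        term_high n 11 (by norm_num [Int.toNat] <;> omega),
        term_high n 12 (by norm_num [Int.toNat] <;> omega),
        term_high n 13 (by norm_num [Int.toNat] <;> omega),
        term_high n 14 (by norm_num [Int.toNat] <;> omega),
        term_high n 15 (by norm_num [Int.toNat] <;> omega),
        term_high n 16 (by norm_num [Int.toNat] <;> omega),
        term_high n 17 (by norm_num [Int.toNat] <;> omega),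
        term_high n 18 (by norm_num [Int.toNat] <;> omega),
        term_high n 19 (by norm_num [Int.toNat] <;> omega)]
      norm_num [Int.toNat]
      all_goals omega
    · norm_num [Int.toNat] at hlo hhi
      simp only [sumTerms, R19, List.map_cons, List.map_nil, List.sum_cons, List.sum_nil]
      rw [show PySem.Int.floordiv (10 ^ (9:Nat) - 1) 9 = 111111111 from by decide,
        term_full n 1 (by norm_num) (by norm_num [Int.toNat] <;> omega),
        term_full n 2 (by norm_num) (by norm_num [Int.toNat] <;> omega),
        term_full n 3 (by norm_num) (by norm_num [Int.toNat] <;> omega),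
        term_full n 4 (by norm_num) (by norm_num [Int.toNat] <;> omega),
        term_full n 5 (by norm_num) (by norm_num [Int.toNat] <;> omega),
        term_full n 6 (by norm_num) (by norm_num [Int.toNat] <;> omega),
        term_full n 7 (by norm_num) (by norm_num [Int.toNat] <;> omega),
        term_full n 8 (by norm_num) (by norm_num [Int.toNat] <;> omega),
        term_at n 9 (by norm_num) (by norm_num [Int.toNat] <;> omega) (by norm_num [Int.toNat] <;> omega),
        term_high n 10 (by norm_num [Int.toNat] <;> omega),
        term_high n 11 (by norm_num [Int.toNat] <;> omega),
        term_high n 12 (by norm_num [Int.toNat] <;> omega),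
        term_high n 13 (by norm_num [Int.toNat] <;> omega),
        term_high n 14 (by norm_num [Int.toNat] <;> omega),
        term_high n 15 (by norm_num [Int.toNat] <;> omega),
        term_high n 16 (by norm_num [Int.toNat] <;> omega),
        term_high n 17 (by norm_num [Int.toNat] <;> omega),
        term_high n 18 (by norm_num [Int.toNat] <;> omega),
        term_high n 19 (by norm_num [Int.toNat] <;> omega)]
      norm_num [Int.toNat]
      all_goals omega
    · norm_num [Int.toNat] at hlo hhi
      simp only [sumTerms, R19, List.map_cons, List.map_nil, List.sum_cons, List.sum_nil]
      rw [show PySem.Int.floordiv (10 ^ (10:Nat) - 1) 9 = 1111111111 from by decide,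
        term_full n 1 (by norm_num) (by norm_num [Int.toNat] <;> omega),
        term_full n 2 (by norm_num) (by norm_num [Int.toNat] <;> omega),
        term_full n 3 (by norm_num) (by norm_num [Int.toNat] <;> omega),
        term_full n 4 (by norm_num) (by norm_num [Int.toNat] <;> omega),
        term_full n 5 (by norm_num) (by norm_num [Int.toNat] <;> omega),
        term_full n 6 (by norm_num) (by norm_num [Int.toNat] <;> omega),
        term_full n 7 (by norm_num) (by norm_num [Int.toNat] <;> omega),
        term_full n 8 (by norm_num) (by norm_num [Int.toNat] <;> omega),
        term_full n 9 (by norm_num) (by norm_num [Int.toNat] <;> omega),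
        term_at n 10 (by norm_num) (by norm_num [Int.toNat] <;> omega) (by norm_num [Int.toNat] <;> omega),
        term_high n 11 (by norm_num [Int.toNat] <;> omega),
        term_high n 12 (by norm_num [Int.toNat] <;> omega),
        term_high n 13 (by norm_num [Int.toNat] <;> omega),
        term_high n 14 (by norm_num [Int.toNat] <;> omega),
        term_high n 15 (by norm_num [Int.toNat] <;> omega),
        term_high n 16 (by norm_num [Int.toNat] <;> omega),
        term_high n 17 (by norm_num [Int.toNat] <;> omega),
        term_high n 18 (by norm_num [Int.toNat] <;> omega),
        term_high n 19 (by norm_num [Int.toNat] <;> omega)]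
      norm_num [Int.toNat]
      all_goals omega

-- ===== VERDICT (by name: the statement is the Claim_ definition above) =====
theorem digitLength_spec : Claim_equal_digitLength := by
  intro start end_ hdom
  have hd : -2147483648 ≤ start ∧ start ≤ 2147483648 ∧
      -2147483648 ≤ end_ ∧ end_ ≤ 2147483648 := by
    simp only [Dom_digitLength, pvDomInt, Bool.and_eq_true, decide_eq_true_eq] at hdom
    exact ⟨hdom.1.1, hdom.1.2, hdom.2.1, hdom.2.2⟩
  show digitLength start end_ = digitLength_alt start end_
  unfold digitLength digitLength_alt
  rw [pyRange_eq_R19]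
  by_cases h0 : start = 0
  · simp only [h0, beq_self_eq_true, if_pos]
    rw [digitLengthLoop_eq 1 end_ R19 (0 + 1) (by decide) R19_one,
      sumTerms_eq_gAlt end_ hd.2.2.2]
    ring
  · have h0' : (start == 0) = false := by simp [h0]
    simp only [h0', Bool.false_eq_true, if_false]
    rw [digitLengthLoop_eq start end_ R19 0 (by decide) R19_one]
    by_cases hs : start ≤ 1
    · have hmax : max start 1 - 1 = 0 := by omega
      rw [sumTerms_of_le_one start end_ R19 hs, sumTerms_eq_gAlt end_ hd.2.2.2, hmax]
      have hg0 : gAlt 0 = 0 := by decide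
      have hnn : 0 ≤ gAlt end_ := by
        rw [← sumTerms_eq_gAlt end_ hd.2.2.2]
        exact sumTerms_nonneg 1 end_ R19 R19_one
      rw [hg0]
      omega
    · have hmax : max start 1 - 1 = start - 1 := by omega
      rw [hmax]
      by_cases hse : start - 1 ≤ end_
      · rw [sumTerms_split start end_ R19 (by omega) hse R19_one,
          sumTerms_eq_gAlt end_ hd.2.2.2, sumTerms_eq_gAlt (start - 1) (by omega)]
        have hmono : gAlt (start - 1) ≤ gAlt end_ := by
          rw [← sumTerms_eq_gAlt end_ hd.2.2.2, ← sumTerms_eq_gAlt (start - 1) (by omega)]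
          exact sumTerms_mono 1 (start - 1) end_ R19 hse R19_one
        omega
      · rw [sumTerms_empty start end_ R19 (by omega) R19_one]
        have hmono : gAlt end_ ≤ gAlt (start - 1) := by
          rw [← sumTerms_eq_gAlt end_ hd.2.2.2, ← sumTerms_eq_gAlt (start - 1) (by omega)]
          exact sumTerms_mono 1 end_ (start - 1) R19 (by omega) R19_one
        omega
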